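-- pv_equiv track=rewrite | github.com/sangorrin/french_popups | data/extract_conjugations.py | merge_tenses
-- ===== SOURCE A (Python) =====
-- def merge_tenses(entries):
--     """
--     Merge tenses from multiple entries, grouping by mood.
--
--     Format: mood;tense1;tense2;mood;tense1;...
--     Multi-word tenses are joined with spaces: "past anterior" instead of "past;anterior"
--     Example: indicative;past anterior;future perfect;subjunctive;past;pluperfect
--     """
--     # Common moods in French
--     moods = {'indicative', 'subjunctive', 'conditional', 'imperative', 'participle',
--              'gerund', 'infinitive'}
--
--     # Collect tenses grouped by mood
--     mood_tenses = {}
--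
--     for entry in entries:
--         if entry['tenses']:
--             tags = [t.strip() for t in entry['tenses'].split(';') if t.strip()]
--
--             # Group consecutive non-mood tags into composite tenses
--             current_mood = None
--             current_tense_parts = []
--
--             for tag in tags:
--                 if tag.lower() in moods:
--                     # Start of a new mood
--                     # Save previous tense if any
--                     if current_tense_parts:
--                         tense = ' '.join(current_tense_parts)
--                         if current_mood:
--                             mood_tenses[current_mood].add(tense)
--                         current_tense_parts = []
--
--                     current_mood = tag
--                     if current_mood not in mood_tenses:
--                         mood_tenses[current_mood] = set()
--                 else:
--                     # This is a tense part, accumulate it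
--                     current_tense_parts.append(tag)
--
--             # Don't forget the last tense
--             if current_tense_parts and current_mood:
--                 tense = ' '.join(current_tense_parts)
--                 mood_tenses[current_mood].add(tense)
--
--     # Build result: mood1;tense1;tense2;mood2;tense1;...
--     result_parts = []
--     for mood in ['indicative', 'subjunctive', 'conditional', 'imperative',
--                  'participle', 'gerund', 'infinitive']:
--         if mood in mood_tenses:
--             result_parts.append(mood)
--             # Add tenses for this mood in sorted order
--             tenses = sorted(mood_tenses[mood])
--             result_parts.extend(tenses)
--
--     return ';'.join(result_parts) if result_parts else ''
-- ===== SOURCE B (Python) =====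
-- def merge_tenses(entries):
--     """Group conjugation tenses by mood (segment extraction instead of a flush state machine)."""
--     moods = {'indicative', 'subjunctive', 'conditional', 'imperative', 'participle',
--              'gerund', 'infinitive'}
--
--     mood_tenses = {}
--
--     for entry in entries:
--         if entry['tenses']:
--             tags = [t.strip() for t in entry['tenses'].split(';') if t.strip()]
--
--             # Build (mood, parts) segments back-to-front: scanning from the right,
--             # pending tags belong to the nearest mood tag on their left.
--             pending = []
--             segments = []
--             for tag in reversed(tags):
--                 if tag.lower() in moods:
--                     segments.insert(0, (tag, pending))
--                     pending = []
--                 else: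
--                     pending.insert(0, tag)
--             # tags before the first mood (still pending) are dropped
--
--             for mood, parts in segments:
--                 if mood not in mood_tenses:
--                     mood_tenses[mood] = set()
--                 if parts:
--                     mood_tenses[mood].add(' '.join(parts))
--
--     result_parts = [x
--                     for mood in ['indicative', 'subjunctive', 'conditional', 'imperative',
--                                  'participle', 'gerund', 'infinitive']
--                     if mood in mood_tenses
--                     for x in [mood] + sorted(mood_tenses[mood])]
--     return ';'.join(result_parts)
-- ===== Notes on version B (the rewrite author's own statement) =====
-- stated objective: alternative
-- what changed: Replaces A's current_mood/current_tense_parts flush state machine by a right-to-left segment extraction (each run of tags attaches to the nearest mood on its left, built back-to-front) followed by a simple register pass, and builds the output with a filtered flat comprehension instead of an append/extend loop.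
-- outside the precondition, e.g. on merge_tenses([{'x': '1'}]): A raises KeyError, B raises KeyError
import Mathlib
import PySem

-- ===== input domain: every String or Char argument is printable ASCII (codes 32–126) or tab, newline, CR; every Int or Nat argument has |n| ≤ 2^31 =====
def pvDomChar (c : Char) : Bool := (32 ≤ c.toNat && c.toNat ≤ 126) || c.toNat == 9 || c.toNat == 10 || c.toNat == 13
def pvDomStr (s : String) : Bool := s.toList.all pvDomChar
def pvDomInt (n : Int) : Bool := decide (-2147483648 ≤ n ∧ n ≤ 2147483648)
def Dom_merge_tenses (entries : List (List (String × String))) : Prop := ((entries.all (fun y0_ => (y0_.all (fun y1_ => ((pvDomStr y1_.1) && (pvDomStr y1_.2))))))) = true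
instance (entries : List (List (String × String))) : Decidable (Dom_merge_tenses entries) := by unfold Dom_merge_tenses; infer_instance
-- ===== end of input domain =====

-- B replaces A's flush state machine by a back-to-front segment extraction plus a register pass
-- (alternative decomposition, same cost); equivalence is about the return value only.

-- helpers shared by both ports (identical lines of the two Pythons)
def pvMoods : PySem.Set String :=
  PySem.Set.ofList ["indicative", "subjunctive", "conditional", "imperative", "participle",
                    "gerund", "infinitive"]

-- entry['tenses']: first-match association-list lookup (KeyError = none, excluded by Pre_)
def pvTenses (entry : List (String × String)) : String :=
  (((entry.find? (fun pr => pr.1 == "tenses")).map (fun pr => pr.2)).getD "")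

-- [t.strip() for t in s.split(';') if t.strip()]
def pvTags (s : String) : List String :=
  ((PySem.Str.split? s ";").getD []).filterMap
    (fun t => let ts := PySem.Str.strip t; if ts = "" then none else some ts)

-- ===== PORT A =====
-- "save previous tense if any" (shared line: A's flush, also B's register tail)
def pvFlush (m : Option String) (p : List String)
    (d : PySem.Dict String (PySem.Set String)) : PySem.Dict String (PySem.Set String) :=
  if p ≠ [] then
    (match m with
     | some mo => d.modify mo PySem.Set.empty (fun s => PySem.Set.add s (PySem.Str.join " " p))
     | none => d)
  else d

-- "if current_mood not in mood_tenses: mood_tenses[current_mood] = set()"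
def pvEnsure (d : PySem.Dict String (PySem.Set String)) (k : String) :
    PySem.Dict String (PySem.Set String) :=
  if d.contains k then d else d.insert k PySem.Set.empty

-- loop body of A's state machine over tags; state = (current_mood, current_tense_parts, mood_tenses)
def mtA_step (st : Option String × List String × PySem.Dict String (PySem.Set String))
    (tag : String) : Option String × List String × PySem.Dict String (PySem.Set String) :=
  let (m, p, d) := st
  if PySem.Set.contains pvMoods (PySem.Str.lower tag) then
    (some tag, [], pvEnsure (pvFlush m p d) tag)
  else (m, p ++ [tag], d)

-- "don't forget the last tense"
def mtA_flush (st : Option String × List String × PySem.Dict String (PySem.Set String)) :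
    PySem.Dict String (PySem.Set String) :=
  pvFlush st.1 st.2.1 st.2.2

def mtA_entry (d : PySem.Dict String (PySem.Set String)) (entry : List (String × String)) :
    PySem.Dict String (PySem.Set String) :=
  if pvTenses entry ≠ "" then
    mtA_flush ((pvTags (pvTenses entry)).foldl mtA_step (none, [], d))
  else d

def merge_tenses (entries : List (List (String × String))) : String :=
  let mood_tenses := entries.foldl mtA_entry PySem.Dict.empty
  let result_parts :=
    (["indicative", "subjunctive", "conditional", "imperative",
      "participle", "gerund", "infinitive"]).foldl
      (fun acc mood =>
        if mood_tenses.contains mood then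
          acc ++ (mood :: PySem.List.sorted (mood_tenses.getD mood PySem.Set.empty)
                    (fun x => x) false)
        else acc) []
  if result_parts ≠ [] then PySem.Str.join ";" result_parts else ""

-- ===== PORT B =====
-- right-to-left scan: pending tags attach to the nearest mood tag on their left
def mtB_step (tag : String)
    (acc : List String × List (String × List String)) :
    List String × List (String × List String) :=
  if PySem.Set.contains pvMoods (PySem.Str.lower tag) then
    ([], (tag, acc.1) :: acc.2)
  else (tag :: acc.1, acc.2)

def mtB_reg (d : PySem.Dict String (PySem.Set String)) (seg : String × List String) :
    PySem.Dict String (PySem.Set String) :=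
  let d1 := pvEnsure d seg.1
  if seg.2 ≠ [] then
    d1.modify seg.1 PySem.Set.empty (fun s => PySem.Set.add s (PySem.Str.join " " seg.2))
  else d1

def mtB_entry (d : PySem.Dict String (PySem.Set String)) (entry : List (String × String)) :
    PySem.Dict String (PySem.Set String) :=
  if pvTenses entry ≠ "" then
    ((pvTags (pvTenses entry)).foldr mtB_step ([], [])).2.foldl mtB_reg d
  else d

def merge_tenses_alt (entries : List (List (String × String))) : String :=
  let mood_tenses := entries.foldl mtB_entry PySem.Dict.empty
  PySem.Str.join ";"
    ((["indicative", "subjunctive", "conditional", "imperative",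
       "participle", "gerund", "infinitive"].filter
        (fun mood => mood_tenses.contains mood)).flatMap
      (fun mood => mood :: PySem.List.sorted (mood_tenses.getD mood PySem.Set.empty)
                     (fun x => x) false))

-- ===== PRECONDITION & SPEC =====
-- Pre_ excludes exactly the entries without a 'tenses' key, where A raises KeyError.
def Pre_merge_tenses (entries : List (List (String × String))) : Prop :=
  (entries.all (fun entry => entry.any (fun pr => pr.1 == "tenses"))) = true
instance (entries : List (List (String × String))) : Decidable (Pre_merge_tenses entries) := by
  unfold Pre_merge_tenses; infer_instance

def pvWitness_merge_tenses : (List (List (String × String))) :=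
  [[("tenses", "Indicative;past anterior;future perfect;subjunctive;past")],
   [("tenses", "gerund;present"), ("x", "y")]]

def Spec_merge_tenses (entries : List (List (String × String))) (out : String) : Prop :=
  out = merge_tenses_alt entries
instance (entries : List (List (String × String))) (out : String) :
    Decidable (Spec_merge_tenses entries out) := by unfold Spec_merge_tenses; infer_instance

-- ===== CLAIM (what is proved, stated in full; the proofs are below) =====
def Claim_equal_merge_tenses : Prop :=
  ∀ (entries : List (List (String × String))), Dom_merge_tenses entries →
    Pre_merge_tenses entries → Spec_merge_tenses entries (merge_tenses entries)

-- ===== LEMMAS AND PROOFS =====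

theorem pvFlush_none (p : List String) (d : PySem.Dict String (PySem.Set String)) :
    pvFlush none p d = d := by
  unfold pvFlush; split <;> rfl

theorem pvEnsure_contains (d : PySem.Dict String (PySem.Set String)) (k : String) :
    (pvEnsure d k).contains k = true := by
  unfold pvEnsure
  by_cases h : d.contains k = true
  · simp [h]
  · simp [h, PySem.Dict.contains_insert_self]

theorem pvEnsure_idem (d : PySem.Dict String (PySem.Set String)) (k : String) :
    pvEnsure (pvEnsure d k) k = pvEnsure d k := by
  unfold pvEnsure
  by_cases h : d.contains k = true
  · simp [h]
  · simp [h, PySem.Dict.contains_insert_self]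

-- registering a segment whose key is already present is exactly A's flush
theorem reg_eq_flush (d : PySem.Dict String (PySem.Set String)) (mo : String)
    (p : List String) (hm : d.contains mo = true) :
    mtB_reg d (mo, p) = pvFlush (some mo) p d := by
  unfold mtB_reg pvFlush pvEnsure
  simp [hm]

theorem reg_ensure (d : PySem.Dict String (PySem.Set String)) (t : String)
    (pend : List String) :
    mtB_reg (pvEnsure d t) (t, pend) = mtB_reg d (t, pend) := by
  unfold mtB_reg
  simp only [pvEnsure_idem]

-- core: A's fold-and-flush equals registering B's segments, from a general state
theorem mtA_eq_segs (tags : List String) :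
    ∀ (m : Option String) (p : List String) (d : PySem.Dict String (PySem.Set String)),
      (∀ mo, m = some mo → d.contains mo = true) →
      mtA_flush (tags.foldl mtA_step (m, p, d)) =
        (match m with
         | some mo => ((mo, p ++ (tags.foldr mtB_step ([], [])).1)
                        :: (tags.foldr mtB_step ([], [])).2).foldl mtB_reg d
         | none => (tags.foldr mtB_step ([], [])).2.foldl mtB_reg d) := by
  induction tags with
  | nil =>
    intro m p d hm
    cases m with
    | none => simp [mtA_flush, pvFlush_none]
    | some mo =>
      simp only [List.foldl_nil, List.foldr_nil, List.append_nil, List.foldl_cons]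
      rw [reg_eq_flush d mo p (hm mo rfl)]
      rfl
  | cons t ts ih =>
    intro m p d hm
    simp only [List.foldl_cons, List.foldr_cons]
    by_cases hmood : PySem.Set.contains pvMoods (PySem.Str.lower t) = true
    · have hstep : mtA_step (m, p, d) t = (some t, [], pvEnsure (pvFlush m p d) t) := by
        simp only [mtA_step]; rw [if_pos hmood]
      rw [hstep, ih (some t) [] _ (by intro mo h; injection h with h; subst h
                                      exact pvEnsure_contains _ _)]
      simp only [mtB_step, hmood, if_pos, List.nil_append, List.foldl_cons]
      cases m with
      | none => rw [pvFlush_none, reg_ensure]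
      | some mo =>
        simp only [List.append_nil]
        rw [reg_eq_flush d mo p (hm mo rfl), reg_ensure]
    · have hstep : mtA_step (m, p, d) t = (m, p ++ [t], d) := by
        simp only [mtA_step]; rw [if_neg hmood]
      rw [hstep, ih m (p ++ [t]) d hm]
      simp only [mtB_step, hmood]
      cases m with
      | none => simp
      | some mo => simp [List.append_assoc]

-- output lists agree: A's append loop = B's filter/flatMap comprehension
theorem out_loop_eq (l : List String) (c : String → Bool) (g : String → List String) :
    ∀ acc, l.foldl (fun acc mood => if c mood then acc ++ g mood else acc) acc
      = acc ++ (l.filter c).flatMap g := by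
  induction l with
  | nil => intro acc; simp
  | cons x xs ih =>
    intro acc
    by_cases h : c x = true <;> simp [h, ih, List.append_assoc]

theorem entry_eq (d : PySem.Dict String (PySem.Set String)) (entry : List (String × String)) :
    mtA_entry d entry = mtB_entry d entry := by
  unfold mtA_entry mtB_entry
  by_cases h : pvTenses entry = ""
  · simp [h]
  · simp only [h, ne_eq, not_false_iff, if_pos]
    have := mtA_eq_segs (pvTags (pvTenses entry)) none [] d (by intro mo h; cases h)
    simpa using this

-- ===== VERDICT (by name: the statement is the Claim_ definition above) =====
theorem join_semicolon_if (l : List String) :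
    (if l ≠ [] then PySem.Str.join ";" l else "") = PySem.Str.join ";" l := by
  split
  · rfl
  · next h => rw [not_ne_iff.mp h]; rfl

theorem merge_tenses_spec : Claim_equal_merge_tenses := by
  intro entries _ _
  unfold Spec_merge_tenses merge_tenses merge_tenses_alt
  have hf : mtA_entry = mtB_entry := funext fun d => funext fun e => entry_eq d e
  simp only [hf, out_loop_eq, join_semicolon_if, List.nil_append]
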